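-- pv_equiv track=rewrite | github.com/sara-zinnat/Natural-Language-Processing-Projects | Sent gen Bi Tri gram.py | triGramTable
-- ===== SOURCE A (Python) =====
-- def triGramTable(corpus):
-- 	tgTable = {}
--
-- 	tgLength = 0
--
-- 	for sent in corpus:
-- 		for i in range(0,len(sent)-2):
-- 			if sent[i] in tgTable:
-- 				if sent[i+1] in tgTable[sent[i]]:
-- 					if sent[i+2] in tgTable[sent[i]][sent[i+1]]:
-- 						tgTable[sent[i]][sent[i+1]][sent[i+2]] += 1
-- 					else:
-- 						tgTable[sent[i]][sent[i+1]][sent[i+2]] = 1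
-- 				else:
-- 					tgTable[sent[i]][sent[i+1]] = {}
-- 					tgTable[sent[i]][sent[i+1]][sent[i+2]] = 1
-- 					tgLength += 1
-- 			else:
-- 				tgTable[sent[i]] = {}
-- 				tgTable[sent[i]][sent[i+1]] = {}
-- 				tgTable[sent[i]][sent[i+1]][sent[i+2]] = 1
-- 				tgLength += 1
--
-- 	return tgTable, tgLength
-- ===== SOURCE B (Python) =====
-- def group(pairs):
--     """Group (key, value) pairs into {key: [values]} preserving first-seen key order."""
--     d = {}
--     for (k, v) in pairs:
--         d.setdefault(k, []).append(v)
--     return d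
--
--
-- def triGramTable(corpus):
--     trigrams = [(s[i], s[i + 1], s[i + 2]) for s in corpus for i in range(len(s) - 2)]
--     counts = {}
--     for t in trigrams:
--         counts[t] = counts.get(t, 0) + 1
--     byW1 = group((a, (b, c)) for (a, b, c) in counts)
--     tgTable = {a: {b: {c: counts[(a, b, c)] for c in cs}
--                    for (b, cs) in group(pairs).items()}
--                for (a, pairs) in byW1.items()}
--     tgLength = len(dict.fromkeys((a, b) for (a, b, _) in counts))
--     return tgTable, tgLength
-- ===== Notes on version B (the rewrite author's own statement) =====
-- stated objective: alternative
-- what changed: Instead of one pass growing the nested dict with three-level membership branching and an inline bigram counter, B runs a staged pipeline: extract the flat trigram stream, count occurrences in a single flat dict keyed by the whole trigram tuple, group the distinct trigrams by first and then by second word with a generic group-by helper, assemble the nested table declaratively from those groups, and compute tgLength separately as the number of distinct (w1,w2) prefixes.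
import Mathlib
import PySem

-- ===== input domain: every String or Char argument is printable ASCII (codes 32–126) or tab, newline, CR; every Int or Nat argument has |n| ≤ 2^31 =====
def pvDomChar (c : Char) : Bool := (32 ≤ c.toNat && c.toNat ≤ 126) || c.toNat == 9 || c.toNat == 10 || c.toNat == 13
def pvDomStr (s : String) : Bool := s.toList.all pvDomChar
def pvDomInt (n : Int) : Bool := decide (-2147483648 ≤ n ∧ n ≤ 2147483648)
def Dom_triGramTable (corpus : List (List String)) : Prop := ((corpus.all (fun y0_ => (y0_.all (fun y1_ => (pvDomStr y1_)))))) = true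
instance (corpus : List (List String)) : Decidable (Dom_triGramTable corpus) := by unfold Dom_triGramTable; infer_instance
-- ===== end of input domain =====

-- B replaces A's single pass (nested dict grown with three-level membership branching and an
-- inline bigram counter) by a staged pipeline: flat trigram stream -> flat count dict keyed by the
-- whole trigram -> declarative grouped construction of the nested table -> distinct-prefix count
-- (objective: alternative; not faster).

-- ===== PORT A =====
abbrev TgCounts := PySem.Dict String Int
abbrev TgInner := PySem.Dict String TgCounts
abbrev TgTable := PySem.Dict String TgInner
abbrev Tri := String × String × String

-- A's loop body for one trigram occurrence (the three branching levels of A, verbatim)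
def stepA3 (acc : TgTable × Int) (t : Tri) : TgTable × Int :=
  let w1 := t.1
  let w2 := t.2.1
  let w3 := t.2.2
  let tb := acc.1
  let n := acc.2
  if tb.contains w1 then
    let inner := tb.getD w1 PySem.Dict.empty
    if inner.contains w2 then
      let counts := inner.getD w2 PySem.Dict.empty
      if counts.contains w3 then
        (tb.insert w1 (inner.insert w2 (counts.insert w3 (counts.getD w3 0 + 1))), n)
      else
        (tb.insert w1 (inner.insert w2 (counts.insert w3 1)), n)
    else
      (tb.insert w1 (inner.insert w2 ((PySem.Dict.empty : TgCounts).insert w3 1)), n + 1)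
  else
    (tb.insert w1 ((PySem.Dict.empty : TgInner).insert w2 ((PySem.Dict.empty : TgCounts).insert w3 1)), n + 1)

-- sent[i], sent[i+1], sent[i+2] (indices produced by range(0, len(sent)-2) are always in range,
-- so the .getD "" default is never used)
def tgSentA (acc : TgTable × Int) (sent : List String) : TgTable × Int :=
  (PySem.List.pyRange 0 ((sent.length : Int) - 2)).foldl
    (fun acc i =>
      stepA3 acc ((PySem.List.pyGet? sent i).getD "",
                  (PySem.List.pyGet? sent (i + 1)).getD "",
                  (PySem.List.pyGet? sent (i + 2)).getD "")) acc

-- render the nested PySem.Dict as nested association lists (the declared return type)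
def tgOut (t : TgTable) : List (String × List (String × List (String × Int))) :=
  t.items.map (fun p => (p.1, p.2.items.map (fun q => (q.1, q.2.items))))

def triGramTable (corpus : List (List String)) : (List (String × List (String × List (String × Int)))) × Int :=
  let r := corpus.foldl tgSentA (PySem.Dict.empty, 0)
  (tgOut r.1, r.2)

-- ===== PORT B =====
-- group((k, v) pairs) : {k: [values]} preserving first-seen key order (Source B's helper 'group')
def tgGroup {b : Type} (pairs : List (String × b)) : PySem.Dict String (List b) :=
  pairs.foldl (fun d p => d.modify p.1 [] (fun vs => vs ++ [p.2])) PySem.Dict.empty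

def triGramTable_alt (corpus : List (List String)) : (List (String × List (String × List (String × Int)))) × Int :=
  -- trigrams = [(s[i], s[i+1], s[i+2]) for s in corpus for i in range(len(s)-2)]
  let trigrams : List Tri := corpus.flatMap (fun s =>
    (PySem.List.pyRange 0 ((s.length : Int) - 2)).map (fun i =>
      ((PySem.List.pyGet? s i).getD "",
       (PySem.List.pyGet? s (i + 1)).getD "",
       (PySem.List.pyGet? s (i + 2)).getD "")))
  -- counts[t] = counts.get(t, 0) + 1  (one flat dict keyed by the whole trigram)
  let counts : PySem.Dict Tri Int :=
    trigrams.foldl (fun d t => d.insert t (d.getD t 0 + 1)) PySem.Dict.empty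
  -- byW1 = group((a, (b, c)) for (a, b, c) in counts)
  let byW1 := tgGroup (counts.keys.map (fun t => (t.1, (t.2.1, t.2.2))))
  -- tgTable = {a: {b: {c: counts[(a,b,c)] for c in cs} for (b, cs) in group(pairs).items()}
  --            for (a, pairs) in byW1.items()}
  let table := byW1.items.map (fun ap =>
    (ap.1, (tgGroup ap.2).items.map (fun bcs =>
      (bcs.1, bcs.2.map (fun c => (c, counts.getD (ap.1, bcs.1, c) 0))))))
  -- tgLength = len(dict.fromkeys((a, b) for (a, b, _) in counts))
  (table, ((PySem.List.dedup (counts.keys.map (fun t => (t.1, t.2.1)))).length : Int))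

-- ===== PRECONDITION & SPEC =====
def Spec_triGramTable (corpus : List (List String)) (out : (List (String × List (String × List (String × Int)))) × Int) : Prop := out = triGramTable_alt corpus
instance (corpus : List (List String)) (out : (List (String × List (String × List (String × Int)))) × Int) : Decidable (Spec_triGramTable corpus out) := by
  unfold Spec_triGramTable
  have h1 : DecidableEq (List (String × List (String × List (String × Int)))) := fun x y => by infer_instance
  exact @instDecidableEqProd _ _ h1 _ out (triGramTable_alt corpus)

-- ===== CLAIM (what is proved, stated in full; the proofs are below) =====
def Claim_equal_triGramTable : Prop := ∀ (corpus : List (List String)), Dom_triGramTable corpus → Spec_triGramTable corpus (triGramTable corpus)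

-- ===== LEMMAS AND PROOFS =====

-- canonical (grouped) form of the nested table, as a function of the trigram occurrence list
def cCounts (L : List Tri) (w1 w2 : String) : TgCounts :=
  PySem.Dict.mk ((PySem.List.dedup ((L.filter (fun t => t.1 == w1 && t.2.1 == w2)).map (fun t => t.2.2))).map
    (fun w3 => (w3, (L.count (w1, w2, w3) : Int))))

def cInner (L : List Tri) (w1 : String) : TgInner :=
  PySem.Dict.mk ((PySem.List.dedup ((L.filter (fun t => t.1 == w1)).map (fun t => t.2.1))).map
    (fun w2 => (w2, cCounts L w1 w2)))

def cTable (L : List Tri) : TgTable :=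
  PySem.Dict.mk ((PySem.List.dedup (L.map (fun t => t.1))).map (fun w1 => (w1, cInner L w1)))

def cLen (L : List Tri) : Int := ((PySem.List.dedup (L.map (fun t => (t.1, t.2.1)))).length : Int)

lemma nodup_dedup {α : Type} [BEq α] [LawfulBEq α] (xs : List α) : (PySem.List.dedup xs).Nodup :=
  PySem.Set.nodup_ofList xs

lemma mem_dedup {α : Type} [BEq α] [LawfulBEq α] (xs : List α) (y : α) : y ∈ PySem.List.dedup xs ↔ y ∈ xs :=
  PySem.Set.mem_ofList xs y

lemma dedup_append_singleton {α : Type} [BEq α] [LawfulBEq α] (xs : List α) (x : α) :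
    PySem.List.dedup (xs ++ [x]) = if x ∈ xs then PySem.List.dedup xs else PySem.List.dedup xs ++ [x] := by
  unfold PySem.List.dedup
  rw [PySem.Set.ofList_append]
  show (PySem.Set.ofList xs).add x = _
  simp [PySem.Set.add, PySem.Set.mem_ofList]

lemma mkmap_contains {α β : Type} [BEq α] [LawfulBEq α] (K : List α) (f : α → β) (a : α) :
    (PySem.Dict.mk (K.map (fun k => (k, f k)))).contains a = true ↔ a ∈ K := by
  simp [PySem.Dict.contains, List.any_map]

lemma mkmap_getD {α β : Type} [BEq α] [LawfulBEq α] (K : List α) (f : α → β) (a : α)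
    (hK : K.Nodup) (ha : a ∈ K) (d0 : β) :
    (PySem.Dict.mk (K.map (fun k => (k, f k)))).getD a d0 = f a := by
  have hnd : (PySem.Dict.mk (K.map (fun k => (k, f k)))).keys.Nodup := by
    simpa [PySem.Dict.keys, List.map_map, Function.comp_def] using hK
  have hm : (a, f a) ∈ K.map (fun k => (k, f k)) := List.mem_map.mpr ⟨a, ha, rfl⟩
  exact PySem.Dict.getD_of_mem_items (PySem.Dict.mk (K.map (fun k => (k, f k)))) hm hnd d0

lemma mkmap_insert_of_mem {α β : Type} [BEq α] [LawfulBEq α] (K : List α) (f g : α → β) (a : α)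
    (ha : a ∈ K) (hcong : ∀ k ∈ K, k ≠ a → f k = g k) :
    (PySem.Dict.mk (K.map (fun k => (k, f k)))).insert a (g a) = PySem.Dict.mk (K.map (fun k => (k, g k))) := by
  have hc : (PySem.Dict.mk (K.map (fun k => (k, f k)))).contains a = true := by
    simpa [PySem.Dict.contains, List.any_map] using ha
  apply PySem.Dict.ext
  rw [PySem.Dict.items_insert_of_contains _ _ hc]
  show (K.map (fun k => (k, f k))).map _ = _
  rw [List.map_map]
  apply List.map_congr_left
  intro k hk
  by_cases hka : k = a
  · subst hka; simp
  · simp [hka, hcong k hk hka]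

lemma mkmap_insert_of_not_mem {α β : Type} [BEq α] [LawfulBEq α] (K : List α) (f : α → β) (a : α)
    (ha : a ∉ K) (v : β) :
    (PySem.Dict.mk (K.map (fun k => (k, f k)))).insert a v = PySem.Dict.mk (K.map (fun k => (k, f k)) ++ [(a, v)]) := by
  have hc : (PySem.Dict.mk (K.map (fun k => (k, f k)))).contains a = false := by
    simp [PySem.Dict.contains, List.any_map]
    intro k hk hka
    subst hka; exact ha hk
  apply PySem.Dict.ext
  rw [PySem.Dict.items_insert_of_not_contains _ _ hc]

-- membership bridges between the three key streams
lemma mem_M1_of_mem {L : List Tri} {x : Tri} (hx : x ∈ L) : x.1 ∈ L.map (fun t => t.1) :=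
  List.mem_map.mpr ⟨x, hx, rfl⟩

lemma mem_M3_iff (L : List Tri) (a b c : String) :
    c ∈ (L.filter (fun t => t.1 == a && t.2.1 == b)).map (fun t => t.2.2) ↔ (a, b, c) ∈ L := by
  simp only [List.mem_map, List.mem_filter, Bool.and_eq_true, beq_iff_eq]
  constructor
  · rintro ⟨x, ⟨hx, h1, h2⟩, h3⟩
    have : x = (a, b, c) := by
      obtain ⟨x1, x2, x3⟩ := x
      simp_all
    exact this ▸ hx
  · intro h
    exact ⟨(a, b, c), ⟨h, rfl, rfl⟩, rfl⟩

lemma pair_mem_iff (L : List Tri) (a b : String) :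
    (a, b) ∈ L.map (fun t => (t.1, t.2.1)) ↔ b ∈ (L.filter (fun t => t.1 == a)).map (fun t => t.2.1) := by
  simp only [List.mem_map, List.mem_filter, beq_iff_eq, Prod.mk.injEq]
  constructor
  · rintro ⟨x, hx, h1, h2⟩
    exact ⟨x, ⟨hx, h1⟩, h2⟩
  · rintro ⟨x, ⟨hx, h1⟩, h2⟩
    exact ⟨x, hx, h1, h2⟩

lemma count_append_ne (L : List Tri) (t x : Tri) (h : x ≠ t) : (L ++ [t]).count x = L.count x := by
  have : ([t]).count x = 0 := List.count_eq_zero.mpr (by simp [h])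
  simp [List.count_append, this]

lemma count_append_self (L : List Tri) (t : Tri) : (L ++ [t]).count t = L.count t + 1 := by
  simp [List.count_append]

-- canonical pieces do not change when a trigram with a different key path is appended
lemma cCounts_append_ne (L : List Tri) (t : Tri) (w1 w2 : String)
    (h : ¬ (t.1 = w1 ∧ t.2.1 = w2)) : cCounts (L ++ [t]) w1 w2 = cCounts L w1 w2 := by
  have hp : (t.1 == w1 && t.2.1 == w2) = false := by
    rcases not_and_or.mp h with h' | h' <;> simp [h']
  unfold cCounts
  rw [List.filter_append]
  simp only [List.filter_cons, hp, Bool.false_eq_true, if_false, List.filter_nil, List.append_nil]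
  congr 1
  apply List.map_congr_left
  intro w3 _
  have hne : (w1, w2, w3) ≠ t := by
    intro he
    exact h ⟨by rw [← he], by rw [← he]⟩
  rw [count_append_ne L t _ hne]

lemma cInner_append_ne (L : List Tri) (t : Tri) (w1 : String)
    (h : t.1 ≠ w1) : cInner (L ++ [t]) w1 = cInner L w1 := by
  have hp : (t.1 == w1) = false := by simp [h]
  unfold cInner
  rw [List.filter_append]
  simp only [List.filter_cons, hp, Bool.false_eq_true, if_false, List.filter_nil, List.append_nil]
  congr 1
  apply List.map_congr_left
  intro w2 _
  rw [cCounts_append_ne L t w1 w2 (fun hc => h hc.1)]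

-- cLen under append
lemma cLen_append_of_mem (L : List Tri) (t : Tri)
    (h : (t.1, t.2.1) ∈ L.map (fun t => (t.1, t.2.1))) : cLen (L ++ [t]) = cLen L := by
  unfold cLen
  rw [List.map_append]
  simp only [List.map_cons, List.map_nil]
  rw [dedup_append_singleton, if_pos h]

lemma cLen_append_of_not_mem (L : List Tri) (t : Tri)
    (h : (t.1, t.2.1) ∉ L.map (fun t => (t.1, t.2.1))) : cLen (L ++ [t]) = cLen L + 1 := by
  unfold cLen
  rw [List.map_append]
  simp only [List.map_cons, List.map_nil]
  rw [dedup_append_singleton, if_neg h]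
  simp

-- the common outer two layers for the case a ∈ M1, b ∈ M2
lemma lift3 (L : List Tri) (a b c : String)
    (h1 : a ∈ L.map (fun t => t.1))
    (h2 : b ∈ (L.filter (fun t => t.1 == a)).map (fun t => t.2.1))
    (v : TgCounts) (hv : v = cCounts (L ++ [(a, b, c)]) a b) :
    (cTable L).insert a ((cInner L a).insert b v) = cTable (L ++ [(a, b, c)]) := by
  subst hv
  have hinner : (cInner L a).insert b (cCounts (L ++ [(a, b, c)]) a b) = cInner (L ++ [(a, b, c)]) a := by
    unfold cInner
    have := mkmap_insert_of_mem
      (PySem.List.dedup ((L.filter (fun t => t.1 == a)).map (fun t => t.2.1)))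
      (fun w2 => cCounts L a w2) (fun w2 => cCounts (L ++ [(a, b, c)]) a w2) b
      ((mem_dedup _ _).mpr h2)
      (fun w2 _ hne => (cCounts_append_ne L (a, b, c) a w2 (fun hc => hne hc.2.symm)).symm)
    rw [this]
    have hfil : (L ++ [(a, b, c)]).filter (fun t => t.1 == a) = L.filter (fun t => t.1 == a) ++ [(a, b, c)] := by
      rw [List.filter_append]; simp
    rw [hfil, List.map_append]
    simp only [List.map_cons, List.map_nil]
    rw [dedup_append_singleton, if_pos h2]
  rw [hinner]
  unfold cTable
  have := mkmap_insert_of_mem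
    (PySem.List.dedup (L.map (fun t => t.1)))
    (fun w1 => cInner L w1) (fun w1 => cInner (L ++ [(a, b, c)]) w1) a
    ((mem_dedup _ _).mpr h1)
    (fun w1 _ hne => (cInner_append_ne L (a, b, c) w1 (fun hc => hne hc.symm)).symm)
  rw [this]
  have hm1 : (L ++ [(a, b, c)]).map (fun t => t.1) = L.map (fun t => t.1) ++ [a] := by simp
  rw [hm1, dedup_append_singleton, if_pos h1]

lemma dedup_singleton {α : Type} [BEq α] [LawfulBEq α] (x : α) : PySem.List.dedup [x] = [x] := rfl

lemma step_canon (L : List Tri) (t : Tri) :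
    stepA3 (cTable L, cLen L) t = (cTable (L ++ [t]), cLen (L ++ [t])) := by
  obtain ⟨a, b, c⟩ := t
  simp only [stepA3]
  by_cases h1 : a ∈ L.map (fun t => t.1)
  · have hc1 : (cTable L).contains a = true := by
      unfold cTable; rw [mkmap_contains]; exact (mem_dedup _ _).mpr h1
    rw [if_pos hc1]
    have hget1 : (cTable L).getD a PySem.Dict.empty = cInner L a := by
      unfold cTable
      exact mkmap_getD _ _ _ (nodup_dedup _) ((mem_dedup _ _).mpr h1) _
    rw [hget1]
    by_cases h2 : b ∈ (L.filter (fun t => t.1 == a)).map (fun t => t.2.1)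
    · have hc2 : (cInner L a).contains b = true := by
        unfold cInner; rw [mkmap_contains]; exact (mem_dedup _ _).mpr h2
      rw [if_pos hc2]
      have hget2 : (cInner L a).getD b PySem.Dict.empty = cCounts L a b := by
        unfold cInner
        exact mkmap_getD _ _ _ (nodup_dedup _) ((mem_dedup _ _).mpr h2) _
      rw [hget2]
      have hLen : cLen (L ++ [(a, b, c)]) = cLen L :=
        cLen_append_of_mem L (a, b, c) ((pair_mem_iff L a b).mpr h2)
      have hfil : (L ++ [(a, b, c)]).filter (fun t => t.1 == a && t.2.1 == b)
          = L.filter (fun t => t.1 == a && t.2.1 == b) ++ [(a, b, c)] := by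
        rw [List.filter_append]; simp
      by_cases h3 : c ∈ (L.filter (fun t => t.1 == a && t.2.1 == b)).map (fun t => t.2.2)
      · have hc3 : (cCounts L a b).contains c = true := by
          unfold cCounts; rw [mkmap_contains]; exact (mem_dedup _ _).mpr h3
        rw [if_pos hc3]
        have hget3 : (cCounts L a b).getD c 0 = (L.count (a, b, c) : Int) := by
          unfold cCounts
          exact mkmap_getD _ _ _ (nodup_dedup _) ((mem_dedup _ _).mpr h3) _
        rw [hget3]
        have hcounts : (cCounts L a b).insert c ((L.count (a, b, c) : Int) + 1)
            = cCounts (L ++ [(a, b, c)]) a b := by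
          unfold cCounts
          have hval : ((L.count (a, b, c) : Int) + 1) = (((L ++ [(a, b, c)]).count (a, b, c) : Nat) : Int) := by
            rw [count_append_self]; push_cast; ring
          rw [hval]
          have hcong : ∀ w3 ∈ PySem.List.dedup ((L.filter (fun t => t.1 == a && t.2.1 == b)).map (fun t => t.2.2)),
              w3 ≠ c →
              (fun w3 => ((L.count (a, b, w3) : Nat) : Int)) w3
                = (fun w3 => (((L ++ [(a, b, c)]).count (a, b, w3) : Nat) : Int)) w3 := by
            intro w3 _ hne
            have hcc := count_append_ne L (a, b, c) (a, b, w3) (by simp [hne])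
            simp [hcc]
          rw [mkmap_insert_of_mem _ _ (fun w3 => (((L ++ [(a, b, c)]).count (a, b, w3) : Nat) : Int)) c
            ((mem_dedup _ _).mpr h3) hcong]
          rw [hfil, List.map_append]
          simp only [List.map_cons, List.map_nil]
          rw [dedup_append_singleton, if_pos h3]
        rw [hcounts, lift3 L a b c h1 h2 _ rfl, hLen]
      · have hc3 : (cCounts L a b).contains c = false := by
          unfold cCounts
          rw [Bool.eq_false_iff]
          intro hc
          exact h3 ((mem_dedup _ _).mp ((mkmap_contains _ _ _).mp hc))
        rw [if_neg (by simp [hc3])]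
        have hL0 : L.count (a, b, c) = 0 :=
          List.count_eq_zero.mpr (fun hm => h3 ((mem_M3_iff L a b c).mpr hm))
        have hcnt : (L ++ [(a, b, c)]).count ((a, b, c) : Tri) = 1 := by
          rw [count_append_self, hL0]
        have hcounts : (cCounts L a b).insert c 1 = cCounts (L ++ [(a, b, c)]) a b := by
          unfold cCounts
          rw [mkmap_insert_of_not_mem _ (fun w3 => ((L.count (a, b, w3) : Nat) : Int)) c
            (fun hm => h3 ((mem_dedup _ _).mp hm)) 1]
          rw [hfil, List.map_append]
          simp only [List.map_cons, List.map_nil]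
          rw [dedup_append_singleton, if_neg h3, List.map_append]
          simp only [List.map_cons, List.map_nil]
          congr 2
          · apply List.map_congr_left
            intro w3 hw3
            have hne : w3 ≠ c := fun he => h3 (he ▸ (mem_dedup _ _).mp hw3)
            have hcc := count_append_ne L (a, b, c) (a, b, w3) (by simp [hne])
            simp [hcc]
          · simp [hcnt]
        rw [hcounts, lift3 L a b c h1 h2 _ rfl, hLen]
    · have hc2 : (cInner L a).contains b = false := by
        unfold cInner
        rw [Bool.eq_false_iff]
        intro hc
        exact h2 ((mem_dedup _ _).mp ((mkmap_contains _ _ _).mp hc))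
      rw [if_neg (by simp [hc2])]
      have hLen : cLen (L ++ [(a, b, c)]) = cLen L + 1 :=
        cLen_append_of_not_mem L (a, b, c) (fun hm => h2 ((pair_mem_iff L a b).mp hm))
      have hfil2 : L.filter (fun t => t.1 == a && t.2.1 == b) = [] := by
        rw [List.filter_eq_nil_iff]
        intro x hx hb
        simp only [Bool.and_eq_true, beq_iff_eq] at hb
        apply h2
        rw [← hb.2]
        exact List.mem_map.mpr ⟨x, List.mem_filter.mpr ⟨hx, by simp [hb.1]⟩, rfl⟩
      have hL0 : L.count (a, b, c) = 0 := by
        apply List.count_eq_zero.mpr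
        intro hm
        have := (mem_M3_iff L a b c).mpr hm
        rw [hfil2] at this
        simp at this
      have hcnt : (L ++ [(a, b, c)]).count ((a, b, c) : Tri) = 1 := by
        rw [count_append_self, hL0]
      have hccb : cCounts (L ++ [(a, b, c)]) a b = PySem.Dict.mk [(c, 1)] := by
        unfold cCounts
        have hfb : (L ++ [(a, b, c)]).filter (fun t => t.1 == a && t.2.1 == b) = [(a, b, c)] := by
          rw [List.filter_append, hfil2]; simp
        rw [hfb]
        simp only [List.map_cons, List.map_nil, dedup_singleton, hcnt]
        norm_num
      have hinner : (cInner L a).insert b ((PySem.Dict.empty : TgCounts).insert c 1)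
          = cInner (L ++ [(a, b, c)]) a := by
        unfold cInner
        rw [mkmap_insert_of_not_mem _ (fun w2 => cCounts L a w2) b
          (fun hm => h2 ((mem_dedup _ _).mp hm)) _]
        have hfa : (L ++ [(a, b, c)]).filter (fun t => t.1 == a)
            = L.filter (fun t => t.1 == a) ++ [(a, b, c)] := by
          rw [List.filter_append]; simp
        rw [hfa, List.map_append]
        simp only [List.map_cons, List.map_nil]
        rw [dedup_append_singleton, if_neg h2, List.map_append]
        simp only [List.map_cons, List.map_nil]
        congr 2
        · apply List.map_congr_left
          intro w2 hw2
          have hne : w2 ≠ b := fun he => h2 (he ▸ (mem_dedup _ _).mp hw2)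
          rw [cCounts_append_ne L (a, b, c) a w2 (fun hc => hne hc.2.symm)]
        · rw [hccb]
          rfl
      rw [hinner]
      unfold cTable
      rw [mkmap_insert_of_mem _ (fun w1 => cInner L w1) (fun w1 => cInner (L ++ [(a, b, c)]) w1) a
        ((mem_dedup _ _).mpr h1)
        (fun w1 _ hne => (cInner_append_ne L (a, b, c) w1 (fun hc => hne hc.symm)).symm)]
      have hm1 : (L ++ [(a, b, c)]).map (fun t => t.1) = L.map (fun t => t.1) ++ [a] := by simp
      rw [hm1, dedup_append_singleton, if_pos h1, hLen]
  · have hc1 : (cTable L).contains a = false := by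
      unfold cTable
      rw [Bool.eq_false_iff]
      intro hc
      exact h1 ((mem_dedup _ _).mp ((mkmap_contains _ _ _).mp hc))
    rw [if_neg (by simp [hc1])]
    have hLen : cLen (L ++ [(a, b, c)]) = cLen L + 1 := by
      apply cLen_append_of_not_mem
      intro hm
      rcases List.mem_map.mp hm with ⟨x, hx, hxe⟩
      apply h1
      have hax : x.1 = a := by
        have := congrArg Prod.fst hxe
        simpa using this
      rw [← hax]
      exact mem_M1_of_mem hx
    have hfil1 : L.filter (fun t => t.1 == a) = [] := by
      rw [List.filter_eq_nil_iff]
      intro x hx ha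
      simp only [beq_iff_eq] at ha
      exact h1 (ha ▸ mem_M1_of_mem hx)
    have hfil2 : L.filter (fun t => t.1 == a && t.2.1 == b) = [] := by
      rw [List.filter_eq_nil_iff]
      intro x hx ha
      simp only [Bool.and_eq_true, beq_iff_eq] at ha
      exact h1 (ha.1 ▸ mem_M1_of_mem hx)
    have hL0 : L.count (a, b, c) = 0 := by
      apply List.count_eq_zero.mpr
      intro hm
      have := (mem_M3_iff L a b c).mpr hm
      rw [hfil2] at this
      simp at this
    have hcnt : (L ++ [(a, b, c)]).count ((a, b, c) : Tri) = 1 := by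
      rw [count_append_self, hL0]
    have hccb : cCounts (L ++ [(a, b, c)]) a b = PySem.Dict.mk [(c, 1)] := by
      unfold cCounts
      have hfb : (L ++ [(a, b, c)]).filter (fun t => t.1 == a && t.2.1 == b) = [(a, b, c)] := by
        rw [List.filter_append, hfil2]; simp
      rw [hfb]
      simp only [List.map_cons, List.map_nil, dedup_singleton, hcnt]
      norm_num
    have hval : (PySem.Dict.empty : TgInner).insert b ((PySem.Dict.empty : TgCounts).insert c 1)
        = cInner (L ++ [(a, b, c)]) a := by
      unfold cInner
      have hfa : (L ++ [(a, b, c)]).filter (fun t => t.1 == a) = [(a, b, c)] := by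
        rw [List.filter_append, hfil1]; simp
      rw [hfa]
      simp only [List.map_cons, List.map_nil, dedup_singleton]
      rw [hccb]
      rfl
    rw [hval]
    unfold cTable
    rw [mkmap_insert_of_not_mem _ (fun w1 => cInner L w1) a
      (fun hm => h1 ((mem_dedup _ _).mp hm)) (cInner (L ++ [(a, b, c)]) a)]
    have hm1 : (L ++ [(a, b, c)]).map (fun t => t.1) = L.map (fun t => t.1) ++ [a] := by simp
    have hmapeq : (PySem.List.dedup (L.map (fun t => t.1))).map (fun w1 => (w1, cInner L w1))
        = (PySem.List.dedup (L.map (fun t => t.1))).map (fun w1 => (w1, cInner (L ++ [(a, b, c)]) w1)) := by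
      apply List.map_congr_left
      intro w1 hw1
      have hne : (a : String) ≠ w1 := fun he => h1 (he ▸ (mem_dedup _ _).mp hw1)
      rw [cInner_append_ne L (a, b, c) w1 hne]
    rw [hm1, dedup_append_singleton, if_neg h1, List.map_append, hLen, hmapeq]
    simp only [List.map_cons, List.map_nil]

lemma fold_canon (L : List Tri) :
    L.foldl stepA3 (PySem.Dict.empty, 0) = (cTable L, cLen L) := by
  induction L using List.reverseRecOn with
  | nil => rfl
  | append_singleton L t ih => rw [List.foldl_append, ih, List.foldl_cons, List.foldl_nil, step_canon]

-- the flat trigram stream B extracts first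
def triStream (corpus : List (List String)) : List Tri :=
  corpus.flatMap (fun s =>
    (PySem.List.pyRange 0 ((s.length : Int) - 2)).map (fun i =>
      ((PySem.List.pyGet? s i).getD "",
       (PySem.List.pyGet? s (i + 1)).getD "",
       (PySem.List.pyGet? s (i + 2)).getD "")))

-- A's double loop is the fold of its per-trigram body over the flat trigram stream
lemma foldA_flat (corpus : List (List String)) :
    ∀ (acc : TgTable × Int), corpus.foldl tgSentA acc = (triStream corpus).foldl stepA3 acc := by
  induction corpus with
  | nil => intro acc; rfl
  | cons s rest ih =>
    intro acc
    rw [List.foldl_cons, ih]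
    show _ = ((s :: rest).flatMap _).foldl stepA3 acc
    rw [List.flatMap_cons, List.foldl_append, List.foldl_map]
    rfl

-- dedup commutes with filter, with map over an already-deduped list, and with an injective map
lemma filter_dedup {α : Type} [BEq α] [LawfulBEq α] (p : α → Bool) (xs : List α) :
    (PySem.List.dedup xs).filter p = PySem.List.dedup (xs.filter p) := by
  induction xs using List.reverseRecOn with
  | nil => rfl
  | append_singleton xs x ih =>
    rw [dedup_append_singleton, List.filter_append]
    by_cases hp : p x
    · simp only [List.filter_cons, hp, if_pos, List.filter_nil]
      rw [dedup_append_singleton]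
      by_cases hx : x ∈ xs
      · have hxf : x ∈ xs.filter p := List.mem_filter.mpr ⟨hx, hp⟩
        rw [if_pos hx, if_pos hxf, ih]
      · have hxf : x ∉ xs.filter p := fun h => hx (List.mem_filter.mp h).1
        rw [if_neg hx, if_neg hxf, List.filter_append, ih]
        simp [hp]
    · simp only [List.filter_cons, hp, Bool.false_eq_true, if_false, List.filter_nil, List.append_nil]
      by_cases hx : x ∈ xs
      · rw [if_pos hx, ih]
      · rw [if_neg hx, List.filter_append, ih]
        simp [hp]

lemma dedup_map_dedup {α β : Type} [BEq α] [LawfulBEq α] [BEq β] [LawfulBEq β] (f : α → β) (xs : List α) :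
    PySem.List.dedup ((PySem.List.dedup xs).map f) = PySem.List.dedup (xs.map f) := by
  induction xs using List.reverseRecOn with
  | nil => rfl
  | append_singleton xs x ih =>
    rw [dedup_append_singleton, List.map_append]
    simp only [List.map_cons, List.map_nil]
    rw [dedup_append_singleton (xs.map f) (f x)]
    by_cases hx : x ∈ xs
    · rw [if_pos hx, if_pos (List.mem_map.mpr ⟨x, hx, rfl⟩), ih]
    · rw [if_neg hx, List.map_append]
      simp only [List.map_cons, List.map_nil]
      rw [dedup_append_singleton ((PySem.List.dedup xs).map f) (f x)]
      by_cases hf : f x ∈ xs.map f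
      · have hf' : f x ∈ (PySem.List.dedup xs).map f := by
          rcases List.mem_map.mp hf with ⟨y, hy, hye⟩
          exact List.mem_map.mpr ⟨y, (mem_dedup _ _).mpr hy, hye⟩
        rw [if_pos hf', if_pos hf, ih]
      · have hf' : f x ∉ (PySem.List.dedup xs).map f := by
          intro h
          rcases List.mem_map.mp h with ⟨y, hy, hye⟩
          exact hf (List.mem_map.mpr ⟨y, (mem_dedup _ _).mp hy, hye⟩)
        rw [if_neg hf', if_neg hf, ih]

lemma map_dedup_inj {α β : Type} [BEq α] [LawfulBEq α] [BEq β] [LawfulBEq β] (f : α → β) (xs : List α)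
    (hinj : ∀ x ∈ xs, ∀ y ∈ xs, f x = f y → x = y) :
    (PySem.List.dedup xs).map f = PySem.List.dedup (xs.map f) := by
  induction xs using List.reverseRecOn with
  | nil => rfl
  | append_singleton xs x ih =>
    have hinj' : ∀ x' ∈ xs, ∀ y ∈ xs, f x' = f y → x' = y := fun x' hx' y hy =>
      hinj x' (List.mem_append_left _ hx') y (List.mem_append_left _ hy)
    rw [dedup_append_singleton, List.map_append]
    simp only [List.map_cons, List.map_nil]
    rw [dedup_append_singleton (xs.map f) (f x)]
    by_cases hx : x ∈ xs
    · rw [if_pos hx, if_pos (List.mem_map.mpr ⟨x, hx, rfl⟩), ih hinj']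
    · have hf : f x ∉ xs.map f := by
        intro h
        rcases List.mem_map.mp h with ⟨y, hy, hye⟩
        exact hx (hinj y (List.mem_append_left _ hy) x (by simp) hye ▸ hy)
      rw [if_neg hx, if_neg hf, List.map_append, ih hinj']
      simp

-- the two facts about Source B's group helper
lemma tgGroup_keys {b : Type} (pairs : List (String × b)) :
    (tgGroup pairs).keys = PySem.List.dedup (pairs.map (fun p => p.1)) := by
  unfold tgGroup
  rw [PySem.Dict.keys_foldl_modify_key pairs (fun p => p.1) [] (fun _ p vs => vs ++ [p.2]) PySem.Dict.empty]
  rfl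

lemma tgGroup_keys_nodup {b : Type} (pairs : List (String × b)) : (tgGroup pairs).keys.Nodup := by
  unfold tgGroup
  exact PySem.Dict.nodup_keys_foldl_modify_key pairs (fun p => p.1) [] (fun _ p vs => vs ++ [p.2])
    PySem.Dict.empty List.nodup_nil

lemma tgGroup_getD {b : Type} (pairs : List (String × b)) (k : String) :
    (tgGroup pairs).getD k [] = (pairs.filter (fun p => p.1 == k)).map (fun p => p.2) := by
  unfold tgGroup
  rw [PySem.Dict.getD_foldl_modify_append pairs PySem.Dict.empty k, PySem.Dict.getD_empty]
  rfl

lemma tgGroup_items {b : Type} (pairs : List (String × b)) :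
    (tgGroup pairs).items
      = (PySem.List.dedup (pairs.map (fun p => p.1))).map
          (fun k => (k, (pairs.filter (fun p => p.1 == k)).map (fun p => p.2))) := by
  rw [PySem.Dict.items_eq_map_keys (tgGroup pairs) (tgGroup_keys_nodup pairs) [], tgGroup_keys]
  apply List.map_congr_left
  intro k _
  rw [tgGroup_getD]

-- B's staged pipeline computes the canonical table and count of the trigram stream
lemma alt_eq (corpus : List (List String)) :
    triGramTable_alt corpus = (tgOut (cTable (triStream corpus)), cLen (triStream corpus)) := by
  have hT : corpus.flatMap (fun s =>
      (PySem.List.pyRange 0 ((s.length : Int) - 2)).map (fun i =>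
        ((PySem.List.pyGet? s i).getD "",
         (PySem.List.pyGet? s (i + 1)).getD "",
         (PySem.List.pyGet? s (i + 2)).getD ""))) = triStream corpus := rfl
  unfold triGramTable_alt
  rw [hT]
  set L := triStream corpus with hLdef
  simp only [PySem.Dict.foldl_insert_getD_add_one_eq_counter, PySem.Dict.keys_counter]
  have hds : PySem.Set.ofList L = PySem.List.dedup L := rfl
  rw [hds]
  refine Prod.ext ?_ ?_
  · -- the nested table
    show ((tgGroup ((PySem.List.dedup L).map (fun t => (t.1, (t.2.1, t.2.2))))).items.map _) = tgOut (cTable L)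
    rw [tgGroup_items, List.map_map, List.map_map]
    simp only [Function.comp_def]
    rw [dedup_map_dedup]
    simp only [tgOut, cTable, List.map_map, Function.comp_def]
    apply List.map_congr_left
    intro a _
    dsimp only
    congr 1
    rw [List.filter_map]
    simp only [List.map_map, Function.comp_def]
    rw [tgGroup_items, List.map_map]
    simp only [List.map_map, Function.comp_def]
    rw [filter_dedup, dedup_map_dedup]
    simp only [cInner, List.map_map, Function.comp_def]
    apply List.map_congr_left
    intro b _
    dsimp only
    congr 1
    rw [List.filter_map]
    simp only [List.map_map, Function.comp_def]
    rw [filter_dedup, List.filter_filter]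
    rw [List.filter_congr (fun (x : Tri) _ => (Bool.and_comm (x.2.1 == b) (x.1 == a)))]
    rw [show (fun x : Tri => (x.2.2, (PySem.Dict.counter L).getD (a, b, x.2.2) 0))
        = ((fun c => (c, (PySem.Dict.counter L).getD (a, b, c) 0)) ∘ (fun x : Tri => x.2.2)) from rfl]
    rw [← List.map_map]
    rw [map_dedup_inj (fun t : Tri => t.2.2) (L.filter (fun t => t.1 == a && t.2.1 == b)) ?inj]
    case inj =>
      intro x hx y hy he
      obtain ⟨hx1, hx2⟩ : x.1 = a ∧ x.2.1 = b := by
        have := (List.mem_filter.mp hx).2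
        simpa using this
      obtain ⟨hy1, hy2⟩ : y.1 = a ∧ y.2.1 = b := by
        have := (List.mem_filter.mp hy).2
        simpa using this
      obtain ⟨x1, x2, x3⟩ := x
      obtain ⟨y1, y2, y3⟩ := y
      simp_all
    simp only [cCounts]
    apply List.map_congr_left
    intro c _
    simp [PySem.Dict.getD_counter]
  · -- the bigram-prefix count
    show ((PySem.List.dedup ((PySem.List.dedup L).map (fun t => (t.1, t.2.1)))).length : Int) = cLen L
    rw [dedup_map_dedup]
    rfl

-- ===== VERDICT (by name: the statement is the Claim_ definition above) =====
theorem triGramTable_spec : Claim_equal_triGramTable := by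
  intro corpus _
  unfold Spec_triGramTable
  rw [alt_eq]
  unfold triGramTable
  show (tgOut (corpus.foldl tgSentA (PySem.Dict.empty, 0)).1, (corpus.foldl tgSentA (PySem.Dict.empty, 0)).2) = _
  rw [foldA_flat corpus (PySem.Dict.empty, 0), fold_canon (triStream corpus)]
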